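-- pv_equiv track=rewrite | github.com/ThomasJRooney/other-projects | othelloGame.py | moveValidityRight
-- ===== SOURCE A (Python) =====
-- def moveValidityRight(board, row, column, color):
--     if board[row][column] == color:
--         return(True)
--     else:
--         if row == 7:
--             if board[row][column] != color and board[row][column] != 0:
--                 return(False)
--         elif row < 7:
--             if board[row][column] != color and board[row][column] != 0:
--                 return(moveValidityRight(board, row + 1, column, color))
--         else:
--             return(False)
-- ===== SOURCE B (Python) =====
-- def moveValidityRight(board, row, column, color):
--     # Iterative walk down the column instead of recursion: one cell read per
--     # step and flat early returns (color -> True, past-the-edge -> False,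
--     # empty -> None, boundary row -> False).
--     while True:
--         cell = board[row][column]
--         if cell == color:
--             return True
--         if row > 7:
--             return False
--         if cell == 0:
--             return None
--         if row == 7:
--             return False
--         row += 1
-- ===== Notes on version B (the rewrite author's own statement) =====
-- stated objective: simpler
-- what changed: The tail recursion with duplicated cell reads and repeated 'cell != color and cell != 0' tests is replaced by a single while loop that reads the cell once per step and decides with flat early returns (color -> True, past-the-edge row -> False, empty -> None, boundary row -> False).
import Mathlib
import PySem

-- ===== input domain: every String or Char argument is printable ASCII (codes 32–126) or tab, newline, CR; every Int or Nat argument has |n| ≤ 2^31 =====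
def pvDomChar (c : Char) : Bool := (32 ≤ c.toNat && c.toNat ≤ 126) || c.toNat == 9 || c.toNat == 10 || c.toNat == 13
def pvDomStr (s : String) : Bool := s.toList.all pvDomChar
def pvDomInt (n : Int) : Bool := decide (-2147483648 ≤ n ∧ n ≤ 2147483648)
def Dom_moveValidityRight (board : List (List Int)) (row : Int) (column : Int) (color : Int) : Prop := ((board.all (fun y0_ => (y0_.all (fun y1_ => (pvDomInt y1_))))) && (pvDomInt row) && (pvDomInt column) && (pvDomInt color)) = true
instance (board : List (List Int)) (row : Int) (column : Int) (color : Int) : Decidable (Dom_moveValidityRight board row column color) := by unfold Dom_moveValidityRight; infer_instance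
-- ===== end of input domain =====

-- B replaces A's tail recursion (with duplicated cell reads and repeated
-- '!= color and != 0' tests) by a single loop reading the cell once per step
-- with flat early returns.


-- ===== PORT A =====
def moveValidityRight (board : List (List Int)) (row : Int) (column : Int) (color : Int) : Option Bool :=
  -- board[row][column]; none = IndexError (those inputs are excluded by Pre_)
  match (PySem.List.pyGet? board row).bind (fun r => PySem.List.pyGet? r column) with
  | none => none          -- Python raises IndexError here; outside Pre_
  | some cell =>
    if cell = color then some true
    else if row = 7 then
      (if cell ≠ color ∧ cell ≠ 0 then some false else none)  -- fall-through returns None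
    else if h : row < 7 then
      (if cell ≠ color ∧ cell ≠ 0 then moveValidityRight board (row + 1) column color else none)
    else some false
termination_by (7 - row).toNat
decreasing_by omega

-- ===== PORT B =====
-- the 'while True' loop of Source B; 'row' is the loop variable
def mvrLoop (board : List (List Int)) (column : Int) (color : Int) (row : Int) : Option Bool :=
  match (PySem.List.pyGet? board row).bind (fun r => PySem.List.pyGet? r column) with
  | none => none          -- Python raises IndexError here; outside Pre_
  | some cell =>
    if cell = color then some true
    else if h7 : 7 < row then some false
    else if cell = 0 then none
    else if row = 7 then some false
    else mvrLoop board column color (row + 1)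
termination_by (7 - row).toNat
decreasing_by omega

def moveValidityRight_alt (board : List (List Int)) (row : Int) (column : Int) (color : Int) : Option Bool :=
  mvrLoop board column color row

-- ===== PRECONDITION & SPEC =====
-- board[r][column] as an Option (none = IndexError), used only to state Pre_
def mvrCell (board : List (List Int)) (column : Int) (r : Int) : Option Int :=
  (PySem.List.pyGet? board r).bind (fun xs => PySem.List.pyGet? xs column)

-- 'the walk moves on from r': r < 7 and board[r][column] is neither color nor empty
def mvrContinues (board : List (List Int)) (column : Int) (color : Int) (r : Int) : Bool :=
  decide (r < 7) &&
    (match mvrCell board column r with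
     | some v => decide (v ≠ color) && decide (v ≠ 0)
     | none => false)

-- walk horizon: 7 - row, capped below at the board edge (below -len the very
-- first read already fails, so the cap never changes the truth value)
def mvrBound (board : List (List Int)) (row : Int) : Nat :=
  (7 - max row (-(board.length : Int) - 1)).toNat

-- Pre_ holds exactly when every cell the walk row, row+1, … actually reads is
-- in range: otherwise Python A raises IndexError on that read.
def Pre_moveValidityRight (board : List (List Int)) (row : Int) (column : Int) (color : Int) : Prop :=
  ∀ k : Nat, k ≤ mvrBound board row →
    (∀ j : Nat, j < k → mvrContinues board column color (row + (j : Int)) = true) →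
    mvrCell board column (row + (k : Int)) ≠ none
instance (board : List (List Int)) (row : Int) (column : Int) (color : Int) : Decidable (Pre_moveValidityRight board row column color) := by unfold Pre_moveValidityRight; infer_instance

def pvWitness_moveValidityRight : List (List Int) × Int × Int × Int :=
  ([[0,0,0,0,0,0,0,0],[0,0,0,0,0,0,0,0],[0,0,0,0,0,0,0,0],[0,0,0,1,2,0,0,0],
    [0,0,0,2,1,0,0,0],[0,0,0,0,0,0,0,0],[0,0,0,0,0,0,0,0],[0,0,0,0,0,0,0,0]], 3, 4, 1)

def Spec_moveValidityRight (board : List (List Int)) (row : Int) (column : Int) (color : Int) (out : Option Bool) : Prop := out = moveValidityRight_alt board row column color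
instance (board : List (List Int)) (row : Int) (column : Int) (color : Int) (out : Option Bool) : Decidable (Spec_moveValidityRight board row column color out) := by unfold Spec_moveValidityRight; infer_instance

-- ===== CLAIM (what is proved, stated in full; the proofs are below) =====
def Claim_equal_moveValidityRight : Prop := ∀ (board : List (List Int)) (row : Int) (column : Int) (color : Int), Dom_moveValidityRight board row column color → Pre_moveValidityRight board row column color → Spec_moveValidityRight board row column color (moveValidityRight board row column color)

-- ===== LEMMAS AND PROOFS =====

-- Pre_ at row with the walk moving on from row gives Pre_ at row + 1
lemma pre_step (board : List (List Int)) (row column color : Int)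
    (hpre : Pre_moveValidityRight board row column color)
    (hlt : row < 7)
    (hcont : mvrContinues board column color row = true) :
    Pre_moveValidityRight board (row + 1) column color := by
  have hrow_lb : -(board.length : Int) ≤ row := by
    have hcell : mvrCell board column row ≠ none := by
      intro hnone; rw [mvrContinues, hnone] at hcont; simp at hcont
    have hrow : PySem.List.pyGet? board row ≠ none := by
      intro hnone; exact hcell (by rw [mvrCell, hnone]; rfl)
    have := (not_iff_not.mpr (PySem.List.pyGet?_eq_none_iff (xs := board) (i := row))).mp hrow
    have := not_not.mp this
    unfold PySem.Raise.InRange at this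
    omega
  intro k hk hj
  have hk' : k + 1 ≤ mvrBound board row := by
    unfold mvrBound at hk ⊢; omega
  have := hpre (k + 1) hk' (by
    intro j hjk
    rcases Nat.eq_zero_or_pos j with hj0 | hj0
    · subst hj0; simpa using hcont
    · have := hj (j - 1) (by omega)
      have hcast : row + (j : Int) = row + 1 + ((j - 1 : Nat) : Int) := by omega
      rw [hcast]; exact this)
  have hcast : row + ((k + 1 : Nat) : Int) = row + 1 + (k : Int) := by push_cast; ring
  rw [hcast] at this
  exact this

-- the two ports agree wherever Pre_ holds (induction on the distance to row 7)
lemma mvr_eq_loop (board : List (List Int)) (column color : Int) :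
    ∀ (n : Nat) (row : Int), (7 - row).toNat = n →
      Pre_moveValidityRight board row column color →
      moveValidityRight board row column color = mvrLoop board column color row := by
  intro n
  induction n with
  | zero =>
    intro row hn hpre
    have h7 : 7 ≤ row := by omega
    have hcell := hpre 0 (Nat.zero_le _) (by intro j hj; omega)
    simp only [Nat.cast_zero, add_zero] at hcell
    obtain ⟨cell, hc⟩ := Option.ne_none_iff_exists'.mp hcell
    rw [moveValidityRight, mvrLoop]
    unfold mvrCell at hc
    rw [hc]
    by_cases hcc : cell = color
    · simp [hcc]
    · by_cases heq : row = 7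
      · subst heq
        by_cases hz : cell = 0 <;> simp [hcc, hz]
      · have hgt : 7 < row := by omega
        simp [hcc, hgt, heq, show ¬ row < 7 by omega]
  | succ n ih =>
    intro row hn hpre
    have hlt : row < 7 := by omega
    have hcell := hpre 0 (Nat.zero_le _) (by intro j hj; omega)
    simp only [Nat.cast_zero, add_zero] at hcell
    obtain ⟨cell, hc⟩ := Option.ne_none_iff_exists'.mp hcell
    rw [moveValidityRight, mvrLoop]
    unfold mvrCell at hc
    rw [hc]
    by_cases hcc : cell = color
    · simp [hcc]
    · by_cases hz : cell = 0
      · simp [hz, show row ≠ 7 by omega, hlt, show ¬ 7 < row by omega]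
      · have hcont : mvrContinues board column color row = true := by
          unfold mvrContinues mvrCell
          rw [hc]
          simp [hlt, hcc, hz]
        have hrec := ih (row + 1) (by omega) (pre_step board row column color hpre hlt hcont)
        simp [hcc, hz, show row ≠ 7 by omega, hlt, show ¬ 7 < row by omega, hrec]

-- ===== VERDICT (by name: the statement is the Claim_ definition above) =====
theorem moveValidityRight_spec : Claim_equal_moveValidityRight := by
  intro board row column color _ hpre
  unfold Spec_moveValidityRight moveValidityRight_alt
  exact mvr_eq_loop board column color (7 - row).toNat row rfl hpre
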